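-- pv_equiv track=rewrite | github.com/0xhunterkiller/Image-Encryption | dnaimage.py | scramble
-- ===== SOURCE A (Python) =====
-- def scramble(k,b):  # Key -> binary string, b -> list of integers
--     zero = []
--     one = []
--     for i in range(len(b)):
--         if k[i%32] == '0':
--             zero.append(b[i])
--         else:
--             one.append(b[i])
--     return one + zero # -> list of values
-- ===== SOURCE B (Python) =====
-- def scramble(k, b):  # Key -> binary string, b -> list of integers
--     # Stable sort of the indices: zero-bit positions (key True) sort after
--     # one-bit positions (key False), each group keeping its original order.
--     order = sorted(range(len(b)), key=lambda i: k[i % 32] == '0')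
--     return [b[i] for i in order]
-- ===== Notes on version B (the rewrite author's own statement) =====
-- stated objective: alternative
-- what changed: Replaces the two explicit zero/one accumulator lists with a single stable sort of the indices by the boolean key k[i%32]=='0', relying on sort stability to keep each group in original order.
import Mathlib
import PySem

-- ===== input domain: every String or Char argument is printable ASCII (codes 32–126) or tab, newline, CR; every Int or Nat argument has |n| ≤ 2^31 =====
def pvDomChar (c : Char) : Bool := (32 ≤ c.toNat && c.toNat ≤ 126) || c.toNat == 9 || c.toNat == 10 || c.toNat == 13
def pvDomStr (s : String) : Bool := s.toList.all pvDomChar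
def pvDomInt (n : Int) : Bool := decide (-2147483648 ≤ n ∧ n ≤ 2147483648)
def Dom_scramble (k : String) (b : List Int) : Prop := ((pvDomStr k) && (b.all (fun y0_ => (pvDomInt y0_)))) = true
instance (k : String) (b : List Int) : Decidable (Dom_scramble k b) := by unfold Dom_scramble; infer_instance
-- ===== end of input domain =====

-- B replaces A's two accumulator lists by one stable sort of the indices under
-- the boolean key k[i%32]=='0' (alternative decomposition; no speed claim).

-- ===== PORT A =====
def scramble (k : String) (b : List Int) : List Int :=
  let st := (PySem.List.pyRange 0 b.length 1).foldl
    (fun (acc : List Int × List Int) i =>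
      if PySem.Str.pyGet? k (PySem.Int.mod i 32) = some '0'
      then (acc.1 ++ [PySem.List.pyGetD b i 0], acc.2)      -- zero.append(b[i])
      else (acc.1, acc.2 ++ [PySem.List.pyGetD b i 0]))     -- one.append(b[i])
    ([], [])
  st.2 ++ st.1                                              -- one + zero

-- ===== PORT B =====
def scramble_alt (k : String) (b : List Int) : List Int :=
  let order := PySem.List.sorted (PySem.List.pyRange 0 b.length 1)
      (fun i => (PySem.Str.pyGet? k (PySem.Int.mod i 32) == some '0' : Bool)) false
  order.map (fun i => PySem.List.pyGetD b i 0)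

-- ===== PRECONDITION & SPEC =====
-- Pre_ excludes exactly the inputs where Python A raises IndexError on k[i%32]:
-- the loop needs the first min(len(b),32) characters of k to exist.
def Pre_scramble (k : String) (b : List Int) : Prop := min b.length 32 ≤ k.length
instance (k : String) (b : List Int) : Decidable (Pre_scramble k b) := by unfold Pre_scramble; infer_instance
def pvWitness_scramble : String × List Int := ("0110", [5, -3, 7, 2])

def Spec_scramble (k : String) (b : List Int) (out : List Int) : Prop := out = scramble_alt k b
instance (k : String) (b : List Int) (out : List Int) : Decidable (Spec_scramble k b out) := by unfold Spec_scramble; infer_instance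

-- ===== CLAIM (what is proved, stated in full; the proofs are below) =====
def Claim_equal_scramble : Prop := ∀ (k : String) (b : List Int), Dom_scramble k b → Pre_scramble k b → Spec_scramble k b (scramble k b)

-- ===== LEMMAS AND PROOFS =====

-- Inserting an element whose Bool key is true goes to the very end (stability).
theorem insertBy_key_true {α : Type} (key : α → Bool) (x : α) (hx : key x = true)
    (l : List α) :
    PySem.List.insertBy (fun a b => decide (key a < key b)) x l = l ++ [x] := by
  apply PySem.List.insertBy_of_forall_not_before
  intro y _
  simp [hx]

-- Inserting an element whose key is false into falses ++ trues lands between them.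
theorem insertBy_key_false {α : Type} (key : α → Bool) (x : α) (hx : key x = false)
    (fs ts : List α) (hfs : ∀ y ∈ fs, key y = false) (hts : ∀ y ∈ ts, key y = true) :
    PySem.List.insertBy (fun a b => decide (key a < key b)) x (fs ++ ts) = fs ++ x :: ts := by
  induction fs with
  | nil =>
    cases ts with
    | nil => simp [PySem.List.insertBy]
    | cons t ts' =>
      have ht : key t = true := hts t (by simp)
      simp [PySem.List.insertBy, hx, ht]
  | cons f fs' ih =>
    have hf : key f = false := hfs f (by simp)
    have : decide (key x < key f) = false := by rw [hx, hf]; decide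
    simp [PySem.List.insertBy, this]
    exact ih (fun y hy => hfs y (by simp [hy])) 

-- Folding insertBy over l starting from a split state keeps the split:
-- false-keyed elements of l are appended (in order) to fs, true-keyed ones to ts.
theorem foldl_insertBy_split {α : Type} (key : α → Bool) :
    ∀ (l fs ts : List α), (∀ y ∈ fs, key y = false) → (∀ y ∈ ts, key y = true) →
    l.foldl (fun acc x => PySem.List.insertBy (fun a b => decide (key a < key b)) x acc) (fs ++ ts)
      = (fs ++ l.filter (fun x => !key x)) ++ (ts ++ l.filter (fun x => key x)) := by
  intro l
  induction l with
  | nil => intro fs ts _ _; simp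
  | cons x l' ih =>
    intro fs ts hfs hts
    cases hx : key x with
    | false =>
      have step := insertBy_key_false key x hx fs ts hfs hts
      have hfs' : ∀ y ∈ fs ++ [x], key y = false := by
        intro y hy; rcases List.mem_append.1 hy with h | h
        · exact hfs y h
        · simp at h; simpa [h] using hx
      have := ih (fs ++ [x]) ts hfs' hts
      simp only [List.foldl_cons, step]
      have hsplit : fs ++ x :: ts = (fs ++ [x]) ++ ts := by simp
      rw [hsplit, this]
      simp [hx]
    | true =>
      have step := insertBy_key_true key x hx (fs ++ ts)
      have hts' : ∀ y ∈ ts ++ [x], key y = true := by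
        intro y hy; rcases List.mem_append.1 hy with h | h
        · exact hts y h
        · simp at h; simpa [h] using hx
      have := ih fs (ts ++ [x]) hfs hts'
      simp only [List.foldl_cons, step]
      have hsplit : (fs ++ ts) ++ [x] = fs ++ (ts ++ [x]) := by simp
      rw [hsplit, this]
      simp [hx]

-- Stable sort by a Bool key = false-keyed elements, then true-keyed, each in order.
theorem sorted_bool_key {α : Type} (l : List α) (key : α → Bool) :
    PySem.List.sorted l key false
      = l.filter (fun x => !key x) ++ l.filter (fun x => key x) := by
  rw [PySem.List.sorted_eq_foldl_insertBy]
  have := foldl_insertBy_split key l [] [] (by simp) (by simp)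
  simpa using this

-- A's accumulator fold, characterised by two filters.
theorem foldl_pair_filter (p : Int → Bool) (g : Int → Int) :
    ∀ (l : List Int) (z o : List Int),
    l.foldl (fun (acc : List Int × List Int) i =>
        if p i = true then (acc.1 ++ [g i], acc.2) else (acc.1, acc.2 ++ [g i])) (z, o)
      = (z ++ (l.filter p).map g, o ++ (l.filter (fun i => !p i)).map g) := by
  intro l
  induction l with
  | nil => intro z o; simp
  | cons x l' ih =>
    intro z o
    cases hx : p x with
    | false => simp only [List.foldl_cons, hx]; rw [ih]; simp [hx]
    | true => simp only [List.foldl_cons, hx]; rw [ih]; simp [hx]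

-- ===== VERDICT (by name: the statement is the Claim_ definition above) =====
theorem scramble_spec : Claim_equal_scramble := by
  intro k b _ _
  unfold Spec_scramble scramble scramble_alt
  set key : Int → Bool := fun i => (PySem.Str.pyGet? k (PySem.Int.mod i 32) == some '0') with hkey
  set g : Int → Int := fun i => PySem.List.pyGetD b i 0 with hg
  set l : List Int := PySem.List.pyRange 0 b.length 1 with hl
  have hA : l.foldl (fun (acc : List Int × List Int) i =>
      if PySem.Str.pyGet? k (PySem.Int.mod i 32) = some '0'
      then (acc.1 ++ [PySem.List.pyGetD b i 0], acc.2)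
      else (acc.1, acc.2 ++ [PySem.List.pyGetD b i 0])) ([], [])
      = ((l.filter key).map g, (l.filter (fun i => !key i)).map g) := by
    have := foldl_pair_filter key g l [] []
    simpa [hkey, hg, beq_iff_eq] using this
  rw [hA, sorted_bool_key l key]
  simp
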